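-- pv_equiv track=rewrite | github.com/mickebanan/aoc2023 | 6.py | search
-- ===== SOURCE A (Python) =====
-- def search(time, distance, right=False):
--     # Binary search from the left (or from the right if right=True)
--     lower, upper = 0, time
--     while lower < upper:
--         mid = (lower + upper) // 2
--         value = (time - mid) * mid
--         if right:
--             if value <= distance:
--                 upper = mid
--             else:
--                 lower = mid + 1
--         else:
--             if value <= distance:
--                 lower = mid + 1
--             else:
--                 upper = mid
--     return lower
-- ===== SOURCE B (Python) =====
-- def search(time, distance, right=False):
--     # Linear sweep from the nearer end instead of bisection, same winning predicate.
--     if right: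
--         for mid in reversed(range(time)):
--             if (time - mid) * mid > distance:
--                 return mid + 1
--         return 0
--     mid = 0
--     while mid < time and (time - mid) * mid <= distance:
--         mid += 1
--     return mid
-- ===== Notes on version B (the rewrite author's own statement) =====
-- stated objective: alternative
-- what changed: Replaced the binary search over [0, time] by two linear sweeps with the same winning predicate: for right=False a while loop advances mid from 0 until it wins or reaches time, for right=True a downward scan from time-1 returns last-winner+1 (or 0); equivalence rests on the concavity of (time-mid)*mid.
import Mathlib
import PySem

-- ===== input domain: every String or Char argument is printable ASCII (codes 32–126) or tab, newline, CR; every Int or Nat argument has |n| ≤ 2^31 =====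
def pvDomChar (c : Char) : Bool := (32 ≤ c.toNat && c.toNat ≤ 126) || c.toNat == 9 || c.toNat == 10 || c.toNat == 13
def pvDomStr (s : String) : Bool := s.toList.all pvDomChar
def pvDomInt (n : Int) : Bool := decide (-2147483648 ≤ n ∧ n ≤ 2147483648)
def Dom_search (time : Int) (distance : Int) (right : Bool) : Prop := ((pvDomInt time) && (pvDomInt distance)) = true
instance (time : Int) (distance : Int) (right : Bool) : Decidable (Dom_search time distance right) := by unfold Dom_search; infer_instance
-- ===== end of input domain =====

-- B replaces A's bisection by a direct linear sweep with the same winning predicate (simpler, not faster).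

-- ===== PORT A =====
-- the while-loop of A, state (lower, upper)
def searchLoop (time : Int) (distance : Int) (right : Bool) (lower upper : Int) : Int :=
  if h : lower < upper then
    let mid := PySem.Int.floordiv (lower + upper) 2
    let value := (time - mid) * mid
    if right then
      if value ≤ distance then searchLoop time distance right lower mid
      else searchLoop time distance right (mid + 1) upper
    else
      if value ≤ distance then searchLoop time distance right (mid + 1) upper
      else searchLoop time distance right lower mid
  else lower
termination_by (upper - lower).toNat
decreasing_by
  all_goals
    have hb := PySem.Int.floordiv_two_mid_bounds (le_of_lt h)
    have h1 : lower * 2 ≤ lower + upper := by omega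
    have h2 : lower + upper < upper * 2 := by omega
    have hl : lower ≤ PySem.Int.floordiv (lower + upper) 2 :=
      (PySem.Int.le_floordiv_iff_mul_le (by omega)).mpr h1
    have hu : PySem.Int.floordiv (lower + upper) 2 < upper :=
      (PySem.Int.floordiv_lt_iff_lt_mul (by omega)).mpr h2
    omega

def search (time : Int) (distance : Int) (right : Bool) : Int :=
  searchLoop time distance right 0 time

-- ===== PORT B =====
-- the while-loop of B for right = False: advance mid while it loses
def scanLoop (time : Int) (distance : Int) (mid : Int) : Int :=
  if mid < time ∧ (time - mid) * mid ≤ distance then scanLoop time distance (mid + 1)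
  else mid
termination_by (time - mid).toNat
decreasing_by omega

-- the for-loop of B over reversed(range(time)) with early return: mid runs time-1, time-2, …, 0
def scanDown (time : Int) (distance : Int) (mid : Int) : Int :=
  if 0 ≤ mid then
    if distance < (time - mid) * mid then mid + 1
    else scanDown time distance (mid - 1)
  else 0
termination_by (mid + 1).toNat
decreasing_by omega

def search_alt (time : Int) (distance : Int) (right : Bool) : Int :=
  if right then scanDown time distance (time - 1)
  else scanLoop time distance 0

-- ===== PRECONDITION & SPEC =====
def Spec_search (time : Int) (distance : Int) (right : Bool) (out : Int) : Prop := out = search_alt time distance right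
instance (time : Int) (distance : Int) (right : Bool) (out : Int) : Decidable (Spec_search time distance right out) := by unfold Spec_search; infer_instance

-- ===== CLAIM (what is proved, stated in full; the proofs are below) =====
def Claim_equal_search : Prop := ∀ (time : Int) (distance : Int) (right : Bool), Dom_search time distance right → Spec_search time distance right (search time distance right)

-- ===== LEMMAS AND PROOFS =====

-- the quadratic (time-m)*m is concave: on a ≤ c ≤ b its value at c dominates the min of the endpoints
theorem pv_concave (time a b c : Int) (hac : a ≤ c) (hcb : c ≤ b) :
    min ((time - a) * a) ((time - b) * b) ≤ (time - c) * c := by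
  rcases le_or_gt (a + c) time with h | h
  · calc min ((time - a) * a) ((time - b) * b) ≤ (time - a) * a := min_le_left _ _
      _ ≤ (time - c) * c := by nlinarith
  · calc min ((time - a) * a) ((time - b) * b) ≤ (time - b) * b := min_le_right _ _
      _ ≤ (time - c) * c := by nlinarith

-- floor(time/2) maximizes (time-m)*m over all integers m
theorem pv_vertex_max (time m : Int) :
    (time - m) * m ≤ (time - PySem.Int.floordiv time 2) * (PySem.Int.floordiv time 2) := by
  set m0 := PySem.Int.floordiv time 2 with hm0
  have h := (PySem.Int.floordiv_eq_iff_of_pos (a := time) (b := 2) (q := m0) (by omega)).mp rfl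
  rcases le_or_gt m m0 with hc | hc
  · nlinarith
  · nlinarith

-- midpoint bounds, packaged
theorem pv_mid_bounds (lower upper : Int) (h : lower < upper) :
    lower ≤ PySem.Int.floordiv (lower + upper) 2 ∧ PySem.Int.floordiv (lower + upper) 2 < upper :=
  ⟨(PySem.Int.le_floordiv_iff_mul_le (by omega)).mpr (by omega),
   (PySem.Int.floordiv_lt_iff_lt_mul (by omega)).mpr (by omega)⟩

-- characterization of B's scan: it returns the unique k meeting these conditions
theorem pv_scan_eq (time distance : Int) (k : Int) (hk : k ≤ time)
    (hwin : distance < (time - k) * k ∨ k = time) :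
    ∀ j, 0 ≤ j → j ≤ k → (∀ m, j ≤ m → m < k → ¬ distance < (time - m) * m) →
      scanLoop time distance j = k := by
  intro j hj0 hjk
  induction hn : (k - j).toNat generalizing j with
  | zero =>
    intro _
    have hjk' : j = k := by omega
    rw [scanLoop]
    rcases hwin with hw | hw
    · simp [hjk', not_le.mpr hw]
    · simp [hjk', hw]
  | succ n ih =>
    intro hno
    have hjlt : j < k := by omega
    have hnw : ¬ distance < (time - j) * j := hno j le_rfl hjlt
    rw [scanLoop]
    have : j < time ∧ (time - j) * j ≤ distance := ⟨by omega, by omega⟩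
    rw [if_pos this]
    exact ih (j + 1) (by omega) (by omega) (by omega) (fun m h1 h2 => hno m (by omega) h2)

-- characterization of B's downward scan: it returns the unique R meeting these conditions
theorem pv_scanDown_eq (time distance : Int) (R : Int)
    (hwin : R = 0 ∨ (1 ≤ R ∧ distance < (time - (R - 1)) * (R - 1))) :
    ∀ j, R - 1 ≤ j → j ≤ time - 1 → (∀ m, R ≤ m → m ≤ j → ¬ distance < (time - m) * m) →
      scanDown time distance j = R := by
  intro j hj1 hj2
  induction hn : (j + 1 - R).toNat generalizing j with
  | zero =>
    intro _
    have hj : j = R - 1 := by omega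
    rcases hwin with h0 | ⟨h1, hw⟩
    · rw [scanDown, if_neg (by omega)]; omega
    · rw [scanDown, if_pos (by omega), if_pos (by rw [hj]; exact hw), hj]; ring
  | succ n ih =>
    intro hno
    have hjR : R ≤ j := by omega
    rw [scanDown, if_pos (by
      rcases hwin with h0 | ⟨h1, _⟩ <;> omega), if_neg (hno j hjR le_rfl)]
    exact ih (j - 1) (by omega) (by omega) (by omega) (fun m h1 h2 => hno m h1 (by omega))

-- A's loop, right = False: under the invariant it returns the value B's scan returns
theorem pv_loopF (time distance : Int) :
    ∀ lower upper, 0 ≤ lower → lower ≤ upper → upper ≤ time →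
      (∀ m, 0 ≤ m → m < lower → ¬ distance < (time - m) * m) →
      (distance < (time - upper) * upper ∨
        (upper = time ∧ (lower = 0 ∨ ∀ m, ¬ distance < (time - m) * m))) →
      searchLoop time distance false lower upper = scanLoop time distance 0 := by
  intro lower upper
  induction hn : (upper - lower).toNat using Nat.strong_induction_on generalizing lower upper with
  | _ n ih =>
  intro h0 hlu hut hbelow hup
  by_cases h : lower < upper
  · obtain ⟨hml, hmu⟩ := pv_mid_bounds lower upper h
    rw [searchLoop, dif_pos h]
    simp only [Bool.false_eq_true, if_false]
    set mid := PySem.Int.floordiv (lower + upper) 2 with hmid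
    by_cases hv : (time - mid) * mid ≤ distance
    · -- mid loses: lower := mid + 1
      rw [if_pos hv]
      refine ih ((upper - (mid + 1)).toNat) (by omega) (mid + 1) upper rfl (by omega) (by omega) hut ?_ ?_
      · -- nobody below mid+1 wins
        intro m hm0 hmlt hwinm
        rcases lt_or_ge m lower with hc | hc
        · exact hbelow m hm0 hc hwinm
        · -- lower ≤ m ≤ mid : sandwich with a winner above mid
          rcases hup with hwu | ⟨hut', hrest⟩
          · -- win upper, m ≤ mid < upper ⇒ win mid, contradiction
            have := pv_concave time m upper mid (by omega) (by omega)
            have : distance < (time - mid) * mid := lt_of_lt_of_le (lt_min hwinm hwu) this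
            omega
          · rcases hrest with hl0 | hall
            · -- lower = 0, upper = time: mid is the global maximizer, it loses ⇒ nobody wins
              have hmid0 : mid = PySem.Int.floordiv time 2 := by
                rw [hmid, hl0, hut']; ring_nf
              have := pv_vertex_max time m
              rw [← hmid0] at this
              omega
            · exact hall m hwinm
      · -- upper-side disjunct is preserved (upper unchanged)
        rcases hup with hwu | ⟨hut', hrest⟩
        · exact Or.inl hwu
        · rcases hrest with hl0 | hall
          · -- as above: maximizer loses ⇒ nobody wins
            refine Or.inr ⟨hut', Or.inr ?_⟩
            intro m hwinm
            have hmid0 : mid = PySem.Int.floordiv time 2 := by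
              rw [hmid, hl0, hut']; ring_nf
            have := pv_vertex_max time m
            rw [← hmid0] at this
            omega
          · exact Or.inr ⟨hut', Or.inr hall⟩
    · -- mid wins: upper := mid
      rw [if_neg hv]
      exact ih ((mid - lower).toNat) (by omega) lower mid rfl h0 (by omega) (by omega) hbelow
        (Or.inl (by omega))
  · -- loop ends: lower = upper, the scan from 0 reaches exactly this value
    have hle : lower = upper := by omega
    rw [searchLoop, dif_neg h]
    refine (pv_scan_eq time distance lower (by omega) ?_ 0 le_rfl h0
      (fun m h1 h2 => hbelow m h1 h2)).symm
    rcases hup with hwu | ⟨hut', _⟩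
    · exact Or.inl (hle ▸ hwu)
    · exact Or.inr (by omega)

-- A's loop, right = True: under its invariant it returns what B's fold returns
theorem pv_loopT (time distance : Int) :
    ∀ lower upper, 0 ≤ lower → lower ≤ upper → upper ≤ time →
      (∀ m, upper ≤ m → m < time → ¬ distance < (time - m) * m) →
      ((1 ≤ lower ∧ distance < (time - (lower - 1)) * (lower - 1)) ∨
        (lower = 0 ∧ (upper = time ∨ ∀ m, ¬ distance < (time - m) * m))) →
      searchLoop time distance true lower upper = scanDown time distance (time - 1) := by
  intro lower upper
  induction hn : (upper - lower).toNat using Nat.strong_induction_on generalizing lower upper with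
  | _ n ih =>
  intro h0 hlu hut habove hlow
  by_cases h : lower < upper
  · obtain ⟨hml, hmu⟩ := pv_mid_bounds lower upper h
    rw [searchLoop, dif_pos h]
    simp only [if_true]
    set mid := PySem.Int.floordiv (lower + upper) 2 with hmid
    by_cases hv : (time - mid) * mid ≤ distance
    · -- mid loses: upper := mid
      rw [if_pos hv]
      refine ih ((mid - lower).toNat) (by omega) lower mid rfl h0 (by omega) (by omega) ?_ ?_
      · -- nobody in [mid, time) wins
        intro m hm1 hm2 hwinm
        rcases le_or_gt upper m with hc | hc
        · exact habove m hc hm2 hwinm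
        · -- mid ≤ m < upper
          rcases hlow with ⟨hl1, hwl⟩ | ⟨hl0, hrest⟩
          · -- winner at lower-1 < mid ≤ m ⇒ win mid, contradiction
            have := pv_concave time (lower - 1) m mid (by omega) (by omega)
            have : distance < (time - mid) * mid := lt_of_lt_of_le (lt_min hwl hwinm) this
            omega
          · rcases hrest with hut' | hall
            · -- lower = 0, upper = time: maximizer loses ⇒ nobody wins
              have hmid0 : mid = PySem.Int.floordiv time 2 := by
                rw [hmid, hl0, hut']; ring_nf
              have := pv_vertex_max time m
              rw [← hmid0] at this
              omega
            · exact hall m hwinm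
      · rcases hlow with ⟨hl1, hwl⟩ | ⟨hl0, hrest⟩
        · exact Or.inl ⟨hl1, hwl⟩
        · rcases hrest with hut' | hall
          · refine Or.inr ⟨hl0, Or.inr ?_⟩
            intro m hwinm
            have hmid0 : mid = PySem.Int.floordiv time 2 := by
              rw [hmid, hl0, hut']; ring_nf
            have := pv_vertex_max time m
            rw [← hmid0] at this
            omega
          · exact Or.inr ⟨hl0, Or.inr hall⟩
    · -- mid wins: lower := mid + 1
      rw [if_neg hv]
      exact ih ((upper - (mid + 1)).toNat) (by omega) (mid + 1) upper rfl (by omega) (by omega)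
        hut habove (Or.inl ⟨by omega, by simpa using (by omega : distance < (time - mid) * mid)⟩)
  · -- loop ends: lower = upper =: R; the downward scan from time-1 stops exactly at R
    have hle : lower = upper := by omega
    rw [searchLoop, dif_neg h]
    refine (pv_scanDown_eq time distance lower ?_ (time - 1) (by omega) le_rfl
      (fun m h1 h2 => habove m (by omega) (by omega))).symm
    rcases hlow with ⟨hl1, hwl⟩ | ⟨hl0, _⟩
    · exact Or.inr ⟨hl1, hwl⟩
    · exact Or.inl hl0

-- ===== VERDICT (by name: the statement is the Claim_ definition above) =====
theorem search_spec : Claim_equal_search := by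
  intro time distance right _
  unfold Spec_search search search_alt
  cases right with
  | false =>
    simp only [Bool.false_eq_true, if_false]
    by_cases ht : 0 < time
    · exact pv_loopF time distance 0 time le_rfl (by omega) le_rfl (by omega)
        (Or.inr ⟨rfl, Or.inl rfl⟩)
    · rw [searchLoop, dif_neg (by omega), scanLoop, if_neg (by omega)]
  | true =>
    simp only [if_true]
    by_cases ht : 0 < time
    · exact pv_loopT time distance 0 time le_rfl (by omega) le_rfl (by omega)
        (Or.inr ⟨rfl, Or.inl rfl⟩)
    · rw [searchLoop, dif_neg (by omega), scanDown, if_neg (by omega)]
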